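-- pv_equiv track=rewrite | github.com/LJuans0/PcProgramacion1 | April26T.py | pregunta_1
-- ===== SOURCE A (Python) =====
-- def pregunta_1(number_init: int, step: int) -> int:
--     """
--     Hallar la cantidad de numeros abundantes de los 5 numeros generados
--     partir del n inicial .
--     Parametros :
--         number_init ( int): El numero inicial utilizado para generar los 5 numeros
--         step (int ): Valor de incremento o disminucion
--     Retorna :
--         int : Retorna la cantidad de numeros abundantes
--     """
--     #hallar cuantos numeros divisibles hay para 28
--     cont=1
--     abundante=0
--     while cont<=5:
--         sumatoria=0
--         div = 1
--         while div < number_init: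
--             if number_init % div == 0:
--                 sumatoria += div
--             div += 1
--         if sumatoria > number_init:
--             abundante += 1
--         number_init += step
--         cont += 1
--     return abundante
-- ===== SOURCE B (Python) =====
-- def _proper_divisor_sum(n: int) -> int:
--     # Sum of proper divisors of n via paired divisors up to sqrt(n); 0 for n <= 1.
--     if n <= 1:
--         return 0
--     s = 0
--     d = 1
--     while d * d <= n:
--         if n % d == 0:
--             s += d
--             e = n // d
--             if e != d and e != n:
--                 s += e
--         d += 1
--     return s
--
--
-- def pregunta_1(number_init: int, step: int) -> int:
--     count = 0
--     n = number_init
--     for _ in range(5):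
--         if _proper_divisor_sum(n) > n:
--             count += 1
--         n += step
--     return count
-- ===== Notes on version B (the rewrite author's own statement) =====
-- stated objective: faster
-- what changed: A sums divisors of each of the 5 numbers by scanning every integer below n; B computes each proper-divisor sum by iterating d only up to sqrt(n), adding d and its cofactor n//d together.
import Mathlib
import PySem

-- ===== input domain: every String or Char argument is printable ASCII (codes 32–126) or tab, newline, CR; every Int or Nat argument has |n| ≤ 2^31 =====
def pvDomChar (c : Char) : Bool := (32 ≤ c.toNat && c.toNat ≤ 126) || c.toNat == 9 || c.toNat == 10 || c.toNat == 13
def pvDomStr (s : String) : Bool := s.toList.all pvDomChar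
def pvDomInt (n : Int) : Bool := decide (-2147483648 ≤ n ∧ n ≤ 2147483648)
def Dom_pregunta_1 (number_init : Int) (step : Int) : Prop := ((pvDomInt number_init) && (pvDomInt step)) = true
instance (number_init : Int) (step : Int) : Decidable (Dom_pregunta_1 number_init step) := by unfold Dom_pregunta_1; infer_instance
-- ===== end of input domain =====

-- B replaces A's linear divisor scan per number by a paired-divisor loop up to sqrt(n); same return value on every input.


-- ===== PORT A =====
-- inner `while div < number_init` loop of A
def pvInnerA (n : Int) (div : Int) (sumatoria : Int) : Int :=
  if _h : div < n then
    pvInnerA n (div + 1) (if PySem.Int.mod n div = 0 then sumatoria + div else sumatoria)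
  else sumatoria
termination_by (n - div).toNat
decreasing_by omega

-- outer `while cont <= 5` loop of A
def pvOuterA (step : Int) (n : Int) (cont : Int) (abundante : Int) : Int :=
  if _h : cont ≤ 5 then
    pvOuterA step (n + step) (cont + 1)
      (if pvInnerA n 1 0 > n then abundante + 1 else abundante)
  else abundante
termination_by (6 - cont).toNat
decreasing_by omega

def pregunta_1 (number_init : Int) (step : Int) : Int :=
  pvOuterA step number_init 1 0

-- ===== PORT B =====
-- `while d*d <= n` loop of B's _proper_divisor_sum
def pvSqrtLoop (n : Int) (d : Int) (s : Int) : Int :=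
  if _h : d * d ≤ n then
    pvSqrtLoop n (d + 1)
      (if PySem.Int.mod n d = 0 then
        let e := PySem.Int.floordiv n d
        (s + d) + (if e ≠ d ∧ e ≠ n then e else 0)
      else s)
  else s
termination_by (n + 1 - d).toNat
decreasing_by
  have h2 : 2 * d - 1 ≤ d * d := by nlinarith [sq_nonneg (d - 1)]
  have h3 : 0 ≤ d * d := mul_self_nonneg d
  omega

def pvProperDivisorSum (n : Int) : Int :=
  if n ≤ 1 then 0 else pvSqrtLoop n 1 0

def pregunta_1_alt (number_init : Int) (step : Int) : Int :=
  ((PySem.List.pyRange 0 5 1).foldl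
    (fun st _ =>
      (if pvProperDivisorSum st.2 > st.2 then st.1 + 1 else st.1, st.2 + step))
    (0, number_init)).1

-- ===== PRECONDITION & SPEC =====
def Spec_pregunta_1 (number_init : Int) (step : Int) (out : Int) : Prop := out = pregunta_1_alt number_init step
instance (number_init : Int) (step : Int) (out : Int) : Decidable (Spec_pregunta_1 number_init step out) := by unfold Spec_pregunta_1; infer_instance

-- ===== CLAIM (what is proved, stated in full; the proofs are below) =====
def Claim_equal_pregunta_1 : Prop := ∀ (number_init : Int) (step : Int), Dom_pregunta_1 number_init step → Spec_pregunta_1 number_init step (pregunta_1 number_init step)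

-- ===== LEMMAS AND PROOFS =====

-- A's inner loop sums the divisors of n lying in [div, n)
theorem pvInnerA_spec (n : Int) : ∀ (div s : Int),
    pvInnerA n div s = s + ∑ d ∈ (Finset.Ico div n).filter (· ∣ n), d := by
  suffices H : ∀ (m : Nat) (div s : Int), (n - div).toNat ≤ m →
      pvInnerA n div s = s + ∑ d ∈ (Finset.Ico div n).filter (· ∣ n), d from
    fun div s => H (n - div).toNat div s le_rfl
  intro m
  induction m with
  | zero =>
    intro div s hle
    have hnd : ¬ div < n := by omega
    rw [pvInnerA, dif_neg hnd, Finset.Ico_eq_empty (by omega)]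
    simp
  | succ m ih =>
    intro div s hle
    by_cases h : div < n
    · rw [pvInnerA, dif_pos h, ih (div + 1) _ (by omega)]
      rw [← Finset.insert_Ico_add_one_left_eq_Ico h, Finset.filter_insert]
      by_cases hd : div ∣ n
      · rw [if_pos hd, Finset.sum_insert (by simp), if_pos ((PySem.Int.mod_eq_zero_iff_dvd n div).mpr hd)]
        ring
      · rw [if_neg hd, if_neg (by simpa [PySem.Int.mod_eq_zero_iff_dvd] using hd)]
    · rw [pvInnerA, dif_neg h, Finset.Ico_eq_empty (by omega)]
      simp

-- B's sqrt loop sums, over each divisor k of n with d ≤ k and k*k ≤ n, k plus its cofactor when distinct and proper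
theorem pvSqrtLoop_spec (n : Int) : ∀ (d s : Int), 1 ≤ d →
    pvSqrtLoop n d s = s + ∑ k ∈ (Finset.Ico d (n + 1)).filter (fun k => k * k ≤ n ∧ k ∣ n),
      (k + if n / k ≠ k ∧ n / k ≠ n then n / k else 0) := by
  suffices H : ∀ (m : Nat) (d s : Int), 1 ≤ d → (n + 1 - d).toNat ≤ m →
      pvSqrtLoop n d s = s + ∑ k ∈ (Finset.Ico d (n + 1)).filter (fun k => k * k ≤ n ∧ k ∣ n),
        (k + if n / k ≠ k ∧ n / k ≠ n then n / k else 0) from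
    fun d s hd => H (n + 1 - d).toNat d s hd le_rfl
  intro m
  induction m with
  | zero =>
    intro d s hd hle
    have hstop : ¬ d * d ≤ n := by
      have h1 : n + 1 ≤ d := by omega
      nlinarith
    rw [pvSqrtLoop, dif_neg hstop, Finset.Ico_eq_empty (by omega)]
    simp
  | succ m ih =>
    intro d s hd hle
    by_cases h : d * d ≤ n
    · have hdn : d ≤ n := by nlinarith
      rw [pvSqrtLoop, dif_pos h, ih (d + 1) _ (by omega) (by omega)]
      dsimp only
      rw [PySem.Int.floordiv_eq_ediv_of_pos (show (0:Int) < d by omega),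
        ← Finset.insert_Ico_add_one_left_eq_Ico (show d < n + 1 by omega), Finset.filter_insert]
      by_cases hdvd : d ∣ n
      · rw [if_pos (show d * d ≤ n ∧ d ∣ n from ⟨h, hdvd⟩), Finset.sum_insert (by simp),
          if_pos ((PySem.Int.mod_eq_zero_iff_dvd n d).mpr hdvd)]
        ring
      · rw [if_neg (show ¬(d * d ≤ n ∧ d ∣ n) from fun hc => hdvd hc.2),
          if_neg (fun hc => hdvd ((PySem.Int.mod_eq_zero_iff_dvd n d).mp hc))]
    · have hfe : (Finset.Ico d (n + 1)).filter (fun k => k * k ≤ n ∧ k ∣ n) = ∅ := by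
        rw [Finset.filter_eq_empty_iff]
        intro k hk
        simp only [Finset.mem_Ico] at hk
        rintro ⟨hkk, -⟩
        nlinarith
      rw [pvSqrtLoop, dif_neg h, hfe]
      simp

-- arithmetic facts about the cofactor n / k of a positive divisor k of n ≥ 1
theorem pvCofacts (n k : Int) (hn : 1 ≤ n) (h1 : 1 ≤ k) (hdvd : k ∣ n) :
    n / k * k = n ∧ 1 ≤ n / k ∧ n / k ≤ n ∧ (n / k) ∣ n ∧ n / (n / k) = k := by
  have hmul : n / k * k = n := Int.ediv_mul_cancel hdvd
  have he1 : 1 ≤ n / k := by nlinarith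
  have hen : n / k ≤ n := by nlinarith
  have hd2 : (n / k) ∣ n := ⟨k, hmul.symm⟩
  have hmul2 : n / (n / k) * (n / k) = n := Int.ediv_mul_cancel hd2
  have hcan : n / (n / k) = k := by
    have : n / (n / k) * (n / k) = k * (n / k) := by rw [hmul2]; linarith [hmul]
    exact mul_right_cancel₀ (by omega) this
  exact ⟨hmul, he1, hen, hd2, hcan⟩

-- pairing each small divisor with its cofactor gives exactly the proper divisors of n
theorem pvPairing (n : Int) (hn : 2 ≤ n) :
    (∑ k ∈ (Finset.Ico 1 (n + 1)).filter (fun k => k * k ≤ n ∧ k ∣ n),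
      (k + if n / k ≠ k ∧ n / k ≠ n then n / k else 0))
    = ∑ d ∈ (Finset.Ico 1 n).filter (· ∣ n), d := by
  rw [Finset.sum_add_distrib,
    ← Finset.sum_filter_add_sum_filter_not ((Finset.Ico 1 n).filter (· ∣ n)) (fun k => k * k ≤ n)]
  have hsmall : (Finset.Ico 1 (n + 1)).filter (fun k => k * k ≤ n ∧ k ∣ n)
      = ((Finset.Ico 1 n).filter (· ∣ n)).filter (fun k => k * k ≤ n) := by
    ext k
    rw [Finset.mem_filter, Finset.mem_filter, Finset.mem_filter, Finset.mem_Ico, Finset.mem_Ico]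
    constructor
    · rintro ⟨⟨h1, h2⟩, h3, h4⟩
      refine ⟨⟨⟨h1, ?_⟩, h4⟩, h3⟩
      rcases lt_or_eq_of_le (show k ≤ n by omega) with h | h
      · exact h
      · exfalso; nlinarith
    · rintro ⟨⟨⟨h1, h2⟩, h3⟩, h4⟩
      exact ⟨⟨h1, by omega⟩, h4, h3⟩
  rw [hsmall]
  congr 1
  rw [← Finset.sum_filter]
  refine Finset.sum_nbij' (i := fun k => n / k) (j := fun e => n / e) ?_ ?_ ?_ ?_ ?_
  · intro k hk
    simp only [Finset.mem_filter, Finset.mem_Ico] at hk ⊢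
    obtain ⟨⟨⟨⟨h1, h2⟩, hdvd⟩, hkk⟩, hne, hnn⟩ := hk
    obtain ⟨hmul, he1, hen, hd2, hcan⟩ := pvCofacts n k (by omega) h1 hdvd
    refine ⟨⟨⟨he1, lt_of_le_of_ne hen hnn⟩, hd2⟩, ?_⟩
    intro hle
    apply hne
    have hk2 : n / k ≤ k := by
      have : n / k * (n / k) ≤ n / k * k := by linarith [hmul]
      exact le_of_mul_le_mul_left this (by omega)
    have hk3 : k ≤ n / k := by
      have : k * k ≤ n / k * k := by linarith [hmul]
      exact le_of_mul_le_mul_right this (by omega)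
    omega
  · intro e he
    simp only [Finset.mem_filter, Finset.mem_Ico, not_le] at he ⊢
    obtain ⟨⟨⟨h1, h2⟩, hdvd⟩, hbig⟩ := he
    obtain ⟨hmul, hk1, hkn, hd2, hcan⟩ := pvCofacts n e (by omega) h1 hdvd
    have hlt : n / e < e := by
      have : n / e * e < e * e := by linarith [hmul]
      exact lt_of_mul_lt_mul_right this (by omega)
    have hkk : n / e * (n / e) ≤ n := by nlinarith
    exact ⟨⟨⟨⟨hk1, by nlinarith⟩, hd2⟩, hkk⟩, by omega, by omega⟩
  · intro k hk
    simp only [Finset.mem_filter, Finset.mem_Ico] at hk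
    obtain ⟨⟨⟨⟨h1, h2⟩, hdvd⟩, hkk⟩, hne, hnn⟩ := hk
    exact (pvCofacts n k (by omega) h1 hdvd).2.2.2.2
  · intro e he
    simp only [Finset.mem_filter, Finset.mem_Ico] at he
    obtain ⟨⟨⟨h1, h2⟩, hdvd⟩, hbig⟩ := he
    exact (pvCofacts n e (by omega) h1 hdvd).2.2.2.2
  · intro k hk
    rfl

-- the two per-number divisor sums agree on every integer
theorem pvInner_eq (n : Int) : pvInnerA n 1 0 = pvProperDivisorSum n := by
  unfold pvProperDivisorSum
  by_cases h : n ≤ 1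
  · rw [if_pos h, pvInnerA, dif_neg (by omega)]
  · rw [if_neg h, pvInnerA_spec, pvSqrtLoop_spec n 1 0 le_rfl, zero_add, zero_add,
      pvPairing n (by omega)]

-- ===== VERDICT (by name: the statement is the Claim_ definition above) =====
theorem pregunta_1_spec : Claim_equal_pregunta_1 := by
  intro n s _
  unfold Spec_pregunta_1 pregunta_1 pregunta_1_alt
  rw [show PySem.List.pyRange 0 5 1 = [0,1,2,3,4] from by decide]
  simp only [List.foldl]
  rw [pvOuterA, pvOuterA, pvOuterA, pvOuterA, pvOuterA, pvOuterA]
  norm_num [pvInner_eq]
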